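-- pv_equiv track=rewrite | github.com/ssafy-silapmyeon/Coding-Test-Study | daehwa_park/10주차/PGS_괄호_변환.py | brace
-- ===== SOURCE A (Python) =====
-- def brace(s):
--     if s == '':
--         return ''
--
--     rb = 0
--     lb = 0
--     u = ''
--     v = ''
--     for i, c in enumerate(s):
--         if i == 0 or rb != lb:
--             if c == '(':
--                 lb += 1
--                 u += '('
--             else:
--                 rb += 1
--                 u += ')'
--         else:
--             v = s[i:]
--             break
--
--     if check(u):
--         return u + brace(v)
--     else:
--         return "("+ brace(v) + ")" + rev(u)
--
-- def rev(u):
--     s = u[1:-1]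
--     ns = ''
--     for c in s:
--         if c == "(":
--             ns += ")"
--         else:
--             ns += "("
--     return ns
--
-- def check(s):
--     cnt = 0
--     for c in s:
--         if cnt < 0:
--             return False
--         if c == "(":
--             cnt += 1
--         else:
--             cnt -= 1
--     return True
-- ===== SOURCE B (Python) =====
-- def brace(s):
--     # normalize: any non-'(' character plays the role of ')'
--     t = ''.join('(' if c == '(' else ')' for c in s)
--     chunks = []
--     rest = t
--     while rest:
--         count = 0
--         j = 0
--         while j < len(rest):
--             count += 1 if rest[j] == '(' else -1
--             j += 1
--             if count == 0:
--                 break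
--         chunks.append(rest[:j])
--         rest = rest[j:]
--     result = ''
--     for u in reversed(chunks):
--         result = u + result if check(u) else '(' + result + ')' + rev(u)
--     return result
--
-- def rev(u):
--     s = u[1:-1]
--     ns = ''
--     for c in s:
--         if c == "(":
--             ns += ")"
--         else:
--             ns += "("
--     return ns
--
-- def check(s):
--     cnt = 0
--     for c in s:
--         if cnt < 0:
--             return False
--         if c == "(":
--             cnt += 1
--         else:
--             cnt -= 1
--     return True
-- ===== Notes on version B (the rewrite author's own statement) =====
-- stated objective: alternative
-- what changed: Replaces A's recursion over the string by an explicit two-phase algorithm: a while-loop splits the normalized input into its list of minimal balanced chunks, then a single right-to-left fold over that chunk list applies the same combining rule (keep a checked chunk, otherwise wrap the accumulated result and append the flipped chunk interior).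
import Mathlib
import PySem

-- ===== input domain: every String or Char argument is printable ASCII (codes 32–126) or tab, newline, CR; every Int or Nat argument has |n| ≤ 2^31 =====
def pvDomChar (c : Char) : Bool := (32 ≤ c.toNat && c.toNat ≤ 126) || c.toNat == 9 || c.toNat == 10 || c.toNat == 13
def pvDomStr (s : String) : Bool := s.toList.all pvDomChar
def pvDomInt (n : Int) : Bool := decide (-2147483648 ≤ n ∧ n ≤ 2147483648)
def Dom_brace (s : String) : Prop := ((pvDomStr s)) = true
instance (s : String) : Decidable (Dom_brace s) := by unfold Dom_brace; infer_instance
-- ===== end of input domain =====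

-- B replaces A's recursion over the string by an explicit two-phase algorithm: split the
-- (normalized) input into its list of minimal balanced chunks, then one right-to-left fold
-- of the combining rule over that chunk list.

-- ===== PORT A =====

-- check(s): running counter, fail as soon as it was negative before a step
def checkL (cnt : Int) : List Char → Bool
  | [] => true
  | c :: cs =>
    if cnt < 0 then false
    else checkL (cnt + (if c = '(' then 1 else -1)) cs

-- rev(u): flip every bracket of u[1:-1]
def revFlip : List Char → List Char
  | [] => []
  | c :: cs => (if c = '(' then ')' else '(') :: revFlip cs

def revL (u : List Char) : List Char := revFlip (PySem.List.slice u (some 1) (some (-1)))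

-- A's for-loop over enumerate(s): state i, rb, lb, u; breaks (returning v = rest) when
-- i ≠ 0 and rb == lb; if the loop runs out, v stays ''.
def goA (i : Nat) (rb lb : Int) (u : List Char) : List Char → List Char × List Char
  | [] => (u, [])
  | c :: cs =>
    if i = 0 ∨ rb ≠ lb then
      if c = '(' then goA (i + 1) rb (lb + 1) (u ++ ['(']) cs
      else goA (i + 1) (rb + 1) lb (u ++ [')']) cs
    else (u, c :: cs)

theorem goA_snd_len (rest : List Char) : ∀ (i : Nat) (rb lb : Int) (u : List Char),
    (goA i rb lb u rest).2.length ≤ rest.length := by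
  induction rest with
  | nil => intro i rb lb u; simp [goA]
  | cons c cs ih =>
    intro i rb lb u
    simp only [goA]
    split
    · split <;> exact le_trans (ih _ _ _ _) (Nat.le_succ _)
    · simp

theorem goA_top_len (c : Char) (cs : List Char) :
    (goA 0 0 0 [] (c :: cs)).2.length < (c :: cs).length := by
  have h : goA 0 0 0 [] (c :: cs) =
      if c = '(' then goA 1 0 1 ['('] cs else goA 1 1 0 [')'] cs := by
    simp [goA]
  rw [h]
  split <;> exact Nat.lt_succ_of_le (goA_snd_len cs _ _ _ _)

theorem braceL_dec (s : List Char) (h : s ≠ []) :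
    (goA 0 0 0 [] s).2.length < s.length := by
  obtain ⟨c, cs, rfl⟩ := List.exists_cons_of_ne_nil h
  exact goA_top_len c cs

def braceL (s : List Char) : List Char :=
  if h : s = [] then []
  else
    let p := goA 0 0 0 [] s
    if checkL 0 p.1 then p.1 ++ braceL p.2
    else ('(' :: braceL p.2) ++ (')' :: revL p.1)
termination_by s.length
decreasing_by
  all_goals exact braceL_dec s h

def brace (s : String) : String := String.mk (braceL s.toList)

-- ===== PORT B =====

-- t = ''.join('(' if c=='(' else ')' for c in s)
def normB : List Char → List Char
  | [] => []
  | c :: cs => (if c = '(' then '(' else ')') :: normB cs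

theorem pv_sub_lt (len j : Nat) (h : j < len) : len - (j + 1) < len - j := by omega

-- inner while: advance j, keeping the running count, stop right after it hits 0
def scanB (s : List Char) (j : Nat) (count : Int) : Nat :=
  if h : j < s.length then
    let count' := count + (if s[j] = '(' then 1 else -1)
    if count' = 0 then j + 1 else scanB s (j + 1) count'
  else j
termination_by s.length - j
decreasing_by exact pv_sub_lt s.length j h

theorem scanB_ge (s : List Char) (j : Nat) (count : Int) : j ≤ scanB s j count := by
  fun_induction scanB <;> omega

theorem scanB_top_pos (c : Char) (cs : List Char) : 1 ≤ scanB (c :: cs) 0 0 := by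
  rw [scanB]
  simp only [List.length_cons]
  rw [dif_pos (Nat.succ_pos cs.length)]
  split <;> split <;> first
    | omega
    | exact le_trans (by omega) (scanB_ge _ _ _)

theorem chunksB_dec (rest : List Char) (h : rest ≠ []) :
    (rest.drop (scanB rest 0 0)).length < rest.length := by
  have h1 : 1 ≤ scanB rest 0 0 := by
    obtain ⟨c, cs, rfl⟩ := List.exists_cons_of_ne_nil h
    exact scanB_top_pos c cs
  have h2 : rest.length ≠ 0 := by simpa using h
  simp only [List.length_drop]; omega

-- outer while: the list of minimal balanced chunks
def chunksB (rest : List Char) : List (List Char) :=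
  if h : rest = [] then []
  else
    let j := scanB rest 0 0
    rest.take j :: chunksB (rest.drop j)
termination_by rest.length
decreasing_by exact chunksB_dec rest h

-- result = '' ; for u in reversed(chunks): result = u+result if check(u) else '('+result+')'+rev(u)
def foldB (chunks : List (List Char)) : List Char :=
  chunks.foldr
    (fun u result =>
      if checkL 0 u then u ++ result else ('(' :: result) ++ (')' :: revL u)) []

def braceAltL (s : List Char) : List Char := foldB (chunksB (normB s))

def brace_alt (s : String) : String := String.mk (braceAltL s.toList)

-- ===== PRECONDITION & SPEC =====
def Spec_brace (s : String) (out : String) : Prop := out = brace_alt s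
instance (s : String) (out : String) : Decidable (Spec_brace s out) := by unfold Spec_brace; infer_instance

-- ===== CLAIM (what is proved, stated in full; the proofs are below) =====
def Claim_equal_brace : Prop := ∀ (s : String), Dom_brace s → Spec_brace s (brace s)

-- ===== LEMMAS AND PROOFS =====

-- proof-side minimal-balanced-prefix length, starting from a running count
def mb (count : Int) : List Char → Nat
  | [] => 0
  | c :: cs =>
    let count' := count + (if c = '(' then 1 else -1)
    if count' = 0 then 1 else 1 + mb count' cs

theorem mb_cons (count : Int) (c : Char) (cs : List Char) :
    mb count (c :: cs) =
      if count + (if c = '(' then 1 else -1) = 0 then 1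
      else 1 + mb (count + (if c = '(' then 1 else -1)) cs := rfl

theorem mb_pos (count : Int) (c : Char) (cs : List Char) : 1 ≤ mb count (c :: cs) := by
  rw [mb_cons]; split <;> split <;> omega

theorem normB_eq_map (l : List Char) :
    normB l = l.map (fun c => if c = '(' then '(' else ')') := by
  induction l with
  | nil => rfl
  | cons c cs ih => simp [normB, ih]

theorem mb_normB (l : List Char) : ∀ count : Int, mb count (normB l) = mb count l := by
  induction l with
  | nil => intro _; rfl
  | cons c cs ih =>
    intro count
    by_cases hc : c = '(' <;> simp [normB, mb_cons, hc, ih]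

theorem scanB_eq_mb (s : List Char) (j : Nat) (count : Int) :
    scanB s j count = j + mb count (s.drop j) := by
  fun_induction scanB with
  | case1 j count h cnt hz =>
    rw [List.drop_eq_getElem_cons h]
    simp only [mb]
    have hz' : (count + if s[j] = '(' then 1 else -1) = 0 := hz
    rw [if_pos hz']
  | case2 j count h cnt hz ih =>
    rw [List.drop_eq_getElem_cons h]
    simp only [mb]
    have hz' : ¬(count + if s[j] = '(' then 1 else -1) = 0 := hz
    rw [if_neg hz', ih]
    have hm : mb cnt (List.drop (j + 1) s) = mb (count + if s[j] = '(' then 1 else -1) (List.drop (j + 1) s) := rfl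
    omega
  | case3 j count h =>
    rw [List.drop_eq_nil_iff.2 (by omega)]
    simp [mb]

theorem goA_eq_mb (rest : List Char) : ∀ (i : Nat) (rb lb : Int) (u : List Char),
    i ≠ 0 → rb ≠ lb →
    goA i rb lb u rest =
      (u ++ normB (rest.take (mb (lb - rb) rest)), rest.drop (mb (lb - rb) rest)) := by
  induction rest with
  | nil => intro i rb lb u _ _; simp [goA, mb, normB]
  | cons c cs ih =>
    intro i rb lb u hi hne
    simp only [goA, if_pos (Or.inr hne)]
    by_cases hc : c = '('
    · subst hc
      rw [if_pos rfl, mb_cons]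
      rw [if_pos rfl]
      by_cases hz : lb - rb + 1 = 0
      · rw [if_pos hz]
        cases cs with
        | nil => simp [goA, normB]
        | cons d ds =>
          have hcond : ¬ (i + 1 = 0 ∨ rb ≠ lb + 1) := by
            simp only [not_or]
            exact ⟨by omega, by omega⟩
          simp only [goA, if_neg hcond]
          simp [normB]
      · rw [if_neg hz]
        rw [ih (i + 1) rb (lb + 1) (u ++ ['(']) (by omega) (by omega)]
        have h1 : lb + 1 - rb = lb - rb + 1 := by omega
        rw [h1]
        have h2 : 1 + mb (lb - rb + 1) cs = mb (lb - rb + 1) cs + 1 := by omega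
        rw [h2, List.take_succ_cons, List.drop_succ_cons]
        simp [normB]
    · rw [if_neg hc, mb_cons, if_neg hc]
      by_cases hz : lb - rb + -1 = 0
      · rw [if_pos hz]
        cases cs with
        | nil => simp [goA, normB, hc]
        | cons d ds =>
          have hcond : ¬ (i + 1 = 0 ∨ rb + 1 ≠ lb) := by
            simp only [not_or]
            exact ⟨by omega, by omega⟩
          simp only [goA, if_neg hcond]
          simp [normB, hc]
      · rw [if_neg hz]
        rw [ih (i + 1) (rb + 1) lb (u ++ [')']) (by omega) (by omega)]
        have h1 : lb - (rb + 1) = lb - rb + -1 := by omega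
        rw [h1]
        have h2 : 1 + mb (lb - rb + -1) cs = mb (lb - rb + -1) cs + 1 := by omega
        rw [h2, List.take_succ_cons, List.drop_succ_cons]
        simp [normB, hc]

theorem goA_top (c : Char) (cs : List Char) :
    goA 0 0 0 [] (c :: cs) =
      (normB ((c :: cs).take (mb 0 (c :: cs))), (c :: cs).drop (mb 0 (c :: cs))) := by
  have h : goA 0 0 0 [] (c :: cs) =
      if c = '(' then goA 1 0 1 ['('] cs else goA 1 1 0 [')'] cs := by
    simp [goA]
  rw [h, mb_cons]
  by_cases hc : c = '('
  · subst hc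
    rw [if_pos rfl, if_pos rfl]
    have hz : ¬ ((0 : Int) + 1 = 0) := by omega
    rw [if_neg hz]
    rw [goA_eq_mb cs 1 0 1 ['('] (by omega) (by omega)]
    have h1 : (1 : Int) - 0 = 0 + 1 := by omega
    rw [h1]
    have h2 : 1 + mb (0 + 1) cs = mb (0 + 1) cs + 1 := by omega
    rw [h2, List.take_succ_cons, List.drop_succ_cons]
    simp [normB]
  · rw [if_neg hc, if_neg hc]
    have hz : ¬ ((0 : Int) + -1 = 0) := by omega
    rw [if_neg hz]
    rw [goA_eq_mb cs 1 1 0 [')'] (by omega) (by omega)]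
    have h1 : (0 : Int) - 1 = 0 + -1 := by omega
    rw [h1]
    have h2 : 1 + mb (0 + -1) cs = mb (0 + -1) cs + 1 := by omega
    rw [h2, List.take_succ_cons, List.drop_succ_cons]
    simp [normB, hc]

theorem normB_take (l : List Char) (n : Nat) : normB (l.take n) = (normB l).take n := by
  simp [normB_eq_map, List.map_take]

theorem normB_drop (l : List Char) (n : Nat) : normB (l.drop n) = (normB l).drop n := by
  simp [normB_eq_map, List.map_drop]

theorem braceL_nil : braceL [] = [] := by
  rw [braceL]
  simp

theorem braceAltL_nil : braceAltL [] = [] := by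
  unfold braceAltL normB
  rw [chunksB]
  rfl

theorem braceL_eq_alt (n : Nat) : ∀ (l : List Char), l.length ≤ n → braceL l = braceAltL l := by
  induction n with
  | zero =>
    intro l hl
    have hnil : l = [] := by
      cases l with
      | nil => rfl
      | cons c cs => simp at hl
    subst hnil
    rw [braceL_nil, braceAltL_nil]
  | succ n ih =>
    intro l hl
    cases l with
    | nil => rw [braceL_nil, braceAltL_nil]
    | cons c cs =>
      set k := mb 0 (c :: cs) with hk
      have hk1 : 1 ≤ k := mb_pos 0 c cs
      -- one step of A's recursion, through goA_top
      have hA : braceL (c :: cs) =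
          if checkL 0 (normB ((c :: cs).take k)) then
            normB ((c :: cs).take k) ++ braceL ((c :: cs).drop k)
          else ('(' :: braceL ((c :: cs).drop k)) ++ (')' :: revL (normB ((c :: cs).take k))) := by
        rw [braceL]
        simp only [dif_neg (List.cons_ne_nil c cs)]
        rw [goA_top]
      -- one step of B's chunk splitter on the normalized list
      have hnn : normB (c :: cs) ≠ [] := by simp [normB]
      have hscan : scanB (normB (c :: cs)) 0 0 = k := by
        rw [scanB_eq_mb]
        simp [mb_normB, hk]
      have hB : chunksB (normB (c :: cs)) =
          (normB (c :: cs)).take k :: chunksB ((normB (c :: cs)).drop k) := by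
        rw [chunksB]
        simp only [dif_neg hnn, hscan]
      have hdroplen : ((c :: cs).drop k).length ≤ n := by
        simp only [List.length_drop, List.length_cons]
        simp only [List.length_cons] at hl
        omega
      have hih := ih ((c :: cs).drop k) hdroplen
      rw [hA, hih]
      show _ = braceAltL (c :: cs)
      unfold braceAltL foldB
      rw [hB]
      simp only [List.foldr_cons]
      rw [← normB_take, ← normB_drop]

-- ===== VERDICT (by name: the statement is the Claim_ definition above) =====
theorem brace_spec : Claim_equal_brace := by
  intro s _
  show brace s = brace_alt s
  unfold brace brace_alt
  rw [braceL_eq_alt s.toList.length s.toList le_rfl]
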